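-- pv_equiv track=rewrite | github.com/Extrieve/HackerRank-Python | double_strings.py | d_strings
-- ===== SOURCE A (Python) =====
-- def d_strings(s):
--     output = []
--     for i, cur in enumerate(s):
--         flag = False
--         for j, t_string in enumerate(s):
--             for k, k_string in enumerate(s):
--                 if cur == (t_string + k_string):
--                     flag = True
--                     break
--
--         output.append('0') if not flag else output.append('1')
--
--     return ''.join(output)
-- ===== SOURCE B (Python) =====
-- def d_strings(s):
--     pool = set(s)
--     return ''.join(
--         '1' if any(cur[:i] in pool and cur[i:] in pool for i in range(len(cur) + 1)) else '0'
--         for cur in s)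
-- ===== Notes on version B (the rewrite author's own statement) =====
-- stated objective: faster
-- what changed: Instead of testing every pair (t,k) of list strings against each element, B builds a hash set of the strings once and for each element tests each split point's prefix and suffix for membership.
import Mathlib
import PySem

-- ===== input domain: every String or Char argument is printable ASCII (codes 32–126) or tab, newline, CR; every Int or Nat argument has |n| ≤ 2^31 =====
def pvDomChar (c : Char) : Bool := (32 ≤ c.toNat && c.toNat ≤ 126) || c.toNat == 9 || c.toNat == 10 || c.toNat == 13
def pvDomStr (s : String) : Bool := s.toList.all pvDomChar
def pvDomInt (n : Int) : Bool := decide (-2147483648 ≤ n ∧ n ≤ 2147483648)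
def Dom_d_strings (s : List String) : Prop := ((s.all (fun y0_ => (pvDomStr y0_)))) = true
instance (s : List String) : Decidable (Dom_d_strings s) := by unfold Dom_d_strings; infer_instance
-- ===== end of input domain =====

-- B replaces A's triple nested scan (every pair of list strings concatenated and compared
-- against each element) by a set of the strings built once, testing each split point's
-- prefix and suffix for membership.

-- ===== PORT A =====
-- the triple loop: for each cur, flag = did some pair (t_string, k_string) concatenate to cur
def d_strings (s : List String) : String :=
  let output := s.foldl (fun output cur =>
    let flag := s.any (fun t_string => s.any (fun k_string =>
      cur.toList == t_string.toList ++ k_string.toList))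
    if !flag then output ++ ["0"] else output ++ ["1"]) []
  PySem.Str.join "" output

-- ===== PORT B =====
def d_strings_alt (s : List String) : String :=
  let pool : PySem.Set (List Char) := PySem.Set.ofList (s.map String.toList)
  PySem.Str.join "" (s.map (fun cur =>
    if (PySem.List.pyRange 0 ((cur.toList.length : Int) + 1) 1).any (fun i =>
        pool.contains (PySem.List.slice cur.toList none (some i)) &&
        pool.contains (PySem.List.slice cur.toList (some i) none))
    then "1" else "0"))

-- ===== PRECONDITION & SPEC =====
def Spec_d_strings (s : List String) (out : String) : Prop := out = d_strings_alt s
instance (s : List String) (out : String) : Decidable (Spec_d_strings s out) := by unfold Spec_d_strings; infer_instance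

-- ===== CLAIM (what is proved, stated in full; the proofs are below) =====
def Claim_equal_d_strings : Prop := ∀ (s : List String), Dom_d_strings s → Spec_d_strings s (d_strings s)

-- ===== LEMMAS AND PROOFS =====

-- A's flag for one element equals B's split-point test for that element
theorem flag_eq (s : List String) (cur : String) :
    s.any (fun t_string => s.any (fun k_string =>
      cur.toList == t_string.toList ++ k_string.toList))
    = (PySem.List.pyRange 0 ((cur.toList.length : Int) + 1) 1).any (fun i =>
        (PySem.Set.ofList (s.map String.toList)).contains (PySem.List.slice cur.toList none (some i)) &&
        (PySem.Set.ofList (s.map String.toList)).contains (PySem.List.slice cur.toList (some i) none)) := by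
  have hC : ∀ x : List Char,
      ((PySem.Set.ofList (s.map String.toList)).contains x = true) ↔ ∃ t ∈ s, t.toList = x := by
    intro x
    have h1 : ((PySem.Set.ofList (s.map String.toList)).contains x = true)
        ↔ x ∈ PySem.Set.ofList (s.map String.toList) := by
      simp [PySem.Set.contains]
    rw [h1, PySem.Set.mem_ofList]
    simp [List.mem_map]
  rw [Bool.eq_iff_iff]
  simp only [List.any_eq_true, Bool.and_eq_true, beq_iff_eq]
  constructor
  · rintro ⟨t, ht, k, hk, hcat⟩
    have hl : cur.toList.length = t.toList.length + k.toList.length := by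
      rw [hcat]; simp
    refine ⟨((t.toList.length : Nat) : Int), ?_, ?_, ?_⟩
    · rw [PySem.List.mem_pyRange_one]; omega
    · rw [PySem.List.slice_to_natCast, hC]
      exact ⟨t, ht, by simp [hcat]⟩
    · rw [PySem.List.slice_from_natCast, hC]
      exact ⟨k, hk, by simp [hcat]⟩
  · rintro ⟨i, hmem, h1, h2⟩
    rw [PySem.List.mem_pyRange_one] at hmem
    have hi : i = ((i.toNat : Nat) : Int) := by omega
    rw [hi, PySem.List.slice_to_natCast, hC] at h1
    rw [hi, PySem.List.slice_from_natCast, hC] at h2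
    obtain ⟨t, ht, hteq⟩ := h1
    obtain ⟨k, hk, hkeq⟩ := h2
    exact ⟨t, ht, k, hk, by rw [hteq, hkeq, List.take_append_drop]⟩

-- ===== VERDICT (by name: the statement is the Claim_ definition above) =====
theorem d_strings_spec : Claim_equal_d_strings := by
  intro s _
  unfold Spec_d_strings d_strings d_strings_alt
  dsimp only
  congr 1
  have hfun : (fun (output : List String) (cur : String) =>
      if !(s.any (fun t_string => s.any (fun k_string =>
          cur.toList == t_string.toList ++ k_string.toList)))
      then output ++ ["0"] else output ++ ["1"])
      = fun (output : List String) (cur : String) => output ++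
        [if (PySem.List.pyRange 0 ((cur.toList.length : Int) + 1) 1).any (fun i =>
            (PySem.Set.ofList (s.map String.toList)).contains (PySem.List.slice cur.toList none (some i)) &&
            (PySem.Set.ofList (s.map String.toList)).contains (PySem.List.slice cur.toList (some i) none))
         then "1" else "0"] := by
    funext output cur
    rw [← flag_eq s cur]
    cases s.any (fun t_string => s.any (fun k_string =>
        cur.toList == t_string.toList ++ k_string.toList)) <;> simp
  rw [hfun, PySem.List.foldl_append_singleton_eq_map]
  simp
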